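-- pv_equiv track=rewrite | github.com/avenet/hackerrank | algorithms/implementation/happy_ladybugs.py | can_make_ladybugs_happy
-- ===== SOURCE A (Python) =====
-- from collections import defaultdict
--
-- def is_happy(board, index):
--     item = board[index]
--
--     prev_item_index = index - 1
--
--     if 0 <= prev_item_index < len(board):
--         if board[prev_item_index] == item:
--             return True
--
--     next_item_index = index + 1
--
--     if 0 <= next_item_index < len(board):
--         if board[next_item_index] == item:
--             return True
--
--     return False
--
-- def check_ladybugs_happy(board):
--     for i in range(len(board)):
--         if not is_happy(board, i):
--             return False
--
--     return True
--
-- def can_make_ladybugs_happy(board):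
--     board_item_counter = defaultdict(int)
--     spaces = 0
--
--     for c in board:
--         if c != '_':
--             board_item_counter[c] += 1
--         else:
--             spaces += 1
--
--     if spaces == 0:
--         return check_ladybugs_happy(board)
--     else:
--         for char, ocurrences in board_item_counter.items():
--             if ocurrences == 1:
--                 return False
--
--     return True
-- ===== SOURCE B (Python) =====
-- def can_make_ladybugs_happy(board):
--     if '_' in board:
--         # a free cell exists: every color is arrangeable iff it occurs at least twice
--         return all(board.count(c) >= 2 for c in set(board) if c != '_')
--     # no free cell: the board is already happy iff every maximal run has length >= 2
--     run, prev = 0, None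
--     for c in board:
--         if c != prev:
--             if run == 1:
--                 return False
--             run, prev = 0, c
--         run += 1
--     return run != 1
-- ===== Notes on version B (the rewrite author's own statement) =====
-- stated objective: simpler
-- what changed: Replaces the defaultdict counter plus per-position neighbor probing (index arithmetic with bounds guards at each i) by a direct count-over-distinct-colors check when a space exists and a single streaming run-length scan when none does.
import Mathlib
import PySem

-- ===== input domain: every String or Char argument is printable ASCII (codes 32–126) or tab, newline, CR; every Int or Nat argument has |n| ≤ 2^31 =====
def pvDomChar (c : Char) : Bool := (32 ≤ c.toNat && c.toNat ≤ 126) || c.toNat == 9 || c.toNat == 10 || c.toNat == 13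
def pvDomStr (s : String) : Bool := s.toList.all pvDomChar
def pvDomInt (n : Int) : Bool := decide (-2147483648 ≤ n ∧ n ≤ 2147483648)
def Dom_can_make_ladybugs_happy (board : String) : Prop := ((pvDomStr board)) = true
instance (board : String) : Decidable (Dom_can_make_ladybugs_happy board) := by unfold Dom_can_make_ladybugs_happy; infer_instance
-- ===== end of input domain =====

-- B replaces the defaultdict counter + per-index neighbor probing by a count-over-distinct-colors
-- check when a space exists and a single streaming run-length scan when none does (objective: simpler).


-- ===== PORT A =====
def is_happy (board : String) (index : Int) : Bool :=
  match PySem.Str.pyGet? board index with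
  | none => false  -- board[index] would raise IndexError; unreachable: the only caller passes 0 ≤ index < len(board)
  | some item =>
    let prev_item_index := index - 1
    -- Python's nested 'if in-range: if equal: return True' is one conjunction here
    if (0 ≤ prev_item_index ∧ prev_item_index < PySem.Str.len board) ∧
        PySem.Str.pyGet? board prev_item_index = some item then true
    else
      let next_item_index := index + 1
      if (0 ≤ next_item_index ∧ next_item_index < PySem.Str.len board) ∧
          PySem.Str.pyGet? board next_item_index = some item then true
      else false

-- 'for i in range(len(board)): if not is_happy(...): return False / return True' = .all
def check_ladybugs_happy (board : String) : Bool :=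
  (PySem.List.pyRange 0 (PySem.Str.len board) 1).all (fun i => is_happy board i)

def can_make_ladybugs_happy (board : String) : Bool :=
  let st := board.toList.foldl
    (fun (acc : PySem.Dict Char Int × Int) c =>
      if c ≠ '_' then (acc.1.modify c 0 (· + 1), acc.2) else (acc.1, acc.2 + 1))
    (PySem.Dict.empty, 0)
  if st.2 = 0 then
    check_ladybugs_happy board
  else
    -- 'for char, ocurrences in items(): if ocurrences == 1: return False / return True'
    st.1.items.all (fun kv => !(kv.2 == 1))

-- ===== PORT B =====
-- the streaming run-length loop of Source B ('run, prev' state, early False return)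
def altScan : List Char → Int → Option Char → Bool
  | [], run, _ => run != 1
  | c :: rest, run, prev =>
    if some c ≠ prev then
      if run = 1 then false
      else altScan rest 1 (some c)      -- 'run, prev = 0, c' then 'run += 1'
    else altScan rest (run + 1) prev

def can_make_ladybugs_happy_alt (board : String) : Bool :=
  if PySem.Str.isIn "_" board then
    -- all(board.count(c) >= 2 for c in set(board) if c != '_'); board.count of a 1-char string is the char count
    ((PySem.Set.ofList board.toList).filter (fun c => !(c == '_'))).all
      (fun c => decide (2 ≤ board.toList.count c))
  else
    altScan board.toList 0 none

-- ===== PRECONDITION & SPEC =====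
def Spec_can_make_ladybugs_happy (board : String) (out : Bool) : Prop := out = can_make_ladybugs_happy_alt board
instance (board : String) (out : Bool) : Decidable (Spec_can_make_ladybugs_happy board out) := by unfold Spec_can_make_ladybugs_happy; infer_instance

-- ===== CLAIM (what is proved, stated in full; the proofs are below) =====
def Claim_equal_can_make_ladybugs_happy : Prop := ∀ (board : String), Dom_can_make_ladybugs_happy board → Spec_can_make_ladybugs_happy board (can_make_ladybugs_happy board)

-- ===== LEMMAS AND PROOFS =====

-- proof-side run predicates: contRun c l = "l, whose left neighbor is c, is happy";
-- needRun c l = "c::l is happy given c still needs a right-hand partner"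
def contRun (c : Char) : List Char → Bool
  | [] => true
  | a :: t => if a = c then contRun c t
              else match t with
                   | [] => false
                   | b :: _ => (a == b) && contRun a t

def needRun (c : Char) (l : List Char) : Bool :=
  match l with
  | [] => false
  | b :: _ => (c == b) && contRun c l

def okRun : List Char → Bool
  | [] => true
  | [_] => false
  | a :: b :: t => (a == b) && contRun a (b :: t)

-- index-wise happiness of position k (left or right neighbor equal)
def happyAt (l : List Char) (k : Nat) : Bool :=
  (decide (0 < k) && (l[k-1]? == l[k]?)) || (l[k+1]? == l[k]?)

lemma contRun_cons_ne (c a : Char) (t : List Char) (h : a ≠ c) :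
    contRun c (a :: t) = needRun a t := by
  cases t <;> simp [contRun, needRun, h]

lemma okRun_cons (a : Char) (t : List Char) : okRun (a :: t) = needRun a t := by
  cases t <;> simp [okRun, needRun, contRun]

-- ---- A side: the index loop equals okRun ----

lemma is_happy_eq (board : String) (k : Nat) (hk : k < board.toList.length) :
    is_happy board (k : Int) = happyAt board.toList k := by
  have hl : PySem.Str.pyGet? board (k : Int) = some board.toList[k] := by
    simp [List.getElem?_eq_getElem hk]
  have hP1 : (((0:Int) ≤ (k : Int) - 1 ∧ (k : Int) - 1 < PySem.Str.len board) ∧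
      PySem.Str.pyGet? board ((k : Int) - 1) = some board.toList[k])
      ↔ (decide (0 < k) && (board.toList[k-1]? == board.toList[k]?)) = true := by
    rw [PySem.Str.len_eq]
    by_cases h0 : 0 < k
    · have e1 : (k : Int) - 1 = ((k - 1 : Nat) : Int) := by omega
      rw [e1, PySem.Str.pyGet?_natCast,
          List.getElem?_eq_getElem (by omega : k - 1 < board.toList.length),
          List.getElem?_eq_getElem hk]
      simp only [h0, decide_true, Bool.true_and, beq_iff_eq, Option.some.injEq]
      constructor
      · rintro ⟨-, he⟩; exact he
      · intro he; exact ⟨⟨by omega, by omega⟩, he⟩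
    · have e0 : k = 0 := by omega
      subst e0
      constructor
      · rintro ⟨⟨h, -⟩, -⟩
        exact absurd h (by norm_num)
      · intro h
        simp at h
  have hP2 : (((0:Int) ≤ (k : Int) + 1 ∧ (k : Int) + 1 < PySem.Str.len board) ∧
      PySem.Str.pyGet? board ((k : Int) + 1) = some board.toList[k])
      ↔ (board.toList[k+1]? == board.toList[k]?) = true := by
    rw [PySem.Str.len_eq]
    have e1 : (k : Int) + 1 = ((k + 1 : Nat) : Int) := by omega
    rw [e1, PySem.Str.pyGet?_natCast, List.getElem?_eq_getElem hk]
    by_cases hn : k + 1 < board.toList.length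
    · rw [List.getElem?_eq_getElem hn]
      simp only [beq_iff_eq, Option.some.injEq]
      constructor
      · rintro ⟨-, he⟩; exact he
      · intro he; exact ⟨⟨by omega, by omega⟩, he⟩
    · rw [List.getElem?_eq_none (by omega : board.toList.length ≤ k + 1)]
      constructor
      · rintro ⟨⟨-, h⟩, -⟩
        exfalso; push_cast at h; omega
      · intro h; simp at h
  unfold is_happy
  rw [hl]
  unfold happyAt
  dsimp only
  split_ifs with h1 h2
  · rw [hP1] at h1
    rw [h1, Bool.true_or]
  · rw [hP2] at h2
    rw [h2, Bool.or_true]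
  · rw [hP1] at h1
    rw [hP2] at h2
    simp only [Bool.not_eq_true] at h1 h2
    rw [h1, h2, Bool.or_false]

lemma check_eq_all (board : String) :
    check_ladybugs_happy board = (List.range board.toList.length).all (happyAt board.toList) := by
  unfold check_ladybugs_happy
  rw [PySem.Str.len_eq, PySem.List.pyRange_zero_natCast, List.all_map]
  rw [Bool.eq_iff_iff]
  simp only [List.all_eq_true, List.mem_range, Function.comp]
  constructor
  · intro h k hk; rw [← is_happy_eq board k hk]; exact h k hk
  · intro h k hk; rw [is_happy_eq board k hk]; exact h k hk

lemma happyAt_cons_succ (c : Char) (l : List Char) (k : Nat) :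
    happyAt (c :: l) (k + 2) = happyAt l (k + 1) := by
  unfold happyAt
  have e1 : k + 2 - 1 = k + 1 := by omega
  have e2 : k + 1 - 1 = k := by omega
  rw [e1, e2]
  simp [List.getElem?_cons_succ]

lemma happyAt_one (c a : Char) (t : List Char) :
    happyAt (c :: a :: t) 1 = ((c == a) || (t[0]? == some a)) := by
  unfold happyAt
  simp

lemma all_happy_eq_contRun : ∀ (l : List Char) (c : Char),
    (List.range l.length).all (fun k => happyAt (c :: l) (k + 1)) = contRun c l := by
  intro l
  induction l with
  | nil => intro c; simp [contRun]
  | cons a t ih =>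
    intro c
    rw [show (a :: t).length = t.length + 1 from rfl, List.range_succ_eq_map, List.all_cons,
        List.all_map]
    have h2 : ((List.range t.length).all ((fun k => happyAt (c :: a :: t) (k + 1)) ∘ (· + 1)))
        = contRun a t := by
      rw [← ih a, Bool.eq_iff_iff]
      simp only [List.all_eq_true, List.mem_range, Function.comp_apply]
      constructor
      · intro h k hk
        have := h k hk
        rwa [happyAt_cons_succ] at this
      · intro h k hk
        rw [happyAt_cons_succ]
        exact h k hk
    rw [h2, happyAt_one]
    by_cases hac : a = c
    · subst hac
      simp [contRun]
    · rw [contRun_cons_ne c a t hac]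
      have hca : (c == a) = false := by
        simp only [beq_eq_false_iff_ne, ne_eq]
        exact fun he => hac he.symm
      rw [hca, Bool.false_or]
      cases t with
      | nil => simp [needRun]
      | cons b t' =>
        unfold needRun
        simp only [List.getElem?_cons_zero]
        have : (some b == some a) = (a == b) := by
          by_cases h : a = b <;> simp [h, eq_comm]
        rw [this]

lemma all_happy_eq_okRun (l : List Char) :
    (List.range l.length).all (happyAt l) = okRun l := by
  match l with
  | [] => simp [okRun]
  | [a] => simp [okRun, happyAt]
  | a :: b :: t =>
    rw [show (a :: b :: t).length = (b :: t).length + 1 from rfl, List.range_succ_eq_map,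
        List.all_cons, List.all_map]
    have h2 : ((List.range (b :: t).length).all ((fun k => happyAt (a :: b :: t) k) ∘ (· + 1)))
        = contRun a (b :: t) := by
      rw [← all_happy_eq_contRun (b :: t) a]
      rfl
    rw [h2]
    have h0 : happyAt (a :: b :: t) 0 = (b == a) := by
      unfold happyAt
      simp
    rw [h0]
    have : (b == a) = (a == b) := by by_cases h : a = b <;> simp [h, eq_comm]
    rw [this, okRun]

-- ---- B side: altScan equals okRun ----

lemma altScan_spec : ∀ (l : List Char),
    (∀ (p : Char) (run : Int), 2 ≤ run → altScan l run (some p) = contRun p l) ∧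
    (∀ (p : Char), altScan l 1 (some p) = needRun p l) := by
  intro l
  induction l with
  | nil =>
    refine ⟨fun p run h2 => ?_, fun p => ?_⟩
    · show (run != 1) = contRun p []
      have hr : (run != 1) = true := by simp; omega
      rw [hr, contRun]
    · show ((1 : Int) != 1) = needRun p []
      rw [needRun]; simp
  | cons a t ih =>
    refine ⟨fun p run h2 => ?_, fun p => ?_⟩
    · by_cases h : a = p
      · subst h
        have e : altScan (a :: t) run (some a) = altScan t (run + 1) (some a) := by
          simp only [altScan]
          rw [if_neg (by simp)]
        rw [e, ih.1 a (run + 1) (by omega)]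
        simp [contRun]
      · have e : altScan (a :: t) run (some p) = altScan t 1 (some a) := by
          simp only [altScan]
          rw [if_pos (by simp [h]), if_neg (by omega)]
        rw [e, ih.2 a, contRun_cons_ne p a t h]
    · by_cases h : a = p
      · subst h
        have e : altScan (a :: t) 1 (some a) = altScan t (1 + 1) (some a) := by
          simp only [altScan]
          rw [if_neg (by simp)]
        rw [e, ih.1 a (1 + 1) (by omega)]
        simp [needRun, contRun]
      · have e : altScan (a :: t) 1 (some p) = false := by
          simp only [altScan]
          rw [if_pos (by simp [h])]
          simp
        rw [e, needRun]
        have hpa : (p == a) = false := by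
          simp only [beq_eq_false_iff_ne, ne_eq]
          exact fun he => h he.symm
        rw [hpa, Bool.false_and]

lemma altScan_zero (l : List Char) : altScan l 0 none = okRun l := by
  cases l with
  | nil => simp [altScan, okRun]
  | cons a t =>
    rw [show altScan (a :: t) 0 none = altScan t 1 (some a) from by simp [altScan]]
    rw [(altScan_spec t).2 a, okRun_cons]

-- ---- the counting branch ----

lemma counter_shape (l : List Char) :
    l.foldl (fun d c => if c ≠ '_' then PySem.Dict.modify d c 0 (· + 1) else d) PySem.Dict.empty
      = PySem.Dict.counter (l.filter (fun c => !(c == '_'))) := by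
  rw [PySem.Dict.counter_eq_foldl, List.foldl_filter]
  have : (fun (d : PySem.Dict Char Int) (c : Char) => if c ≠ '_' then PySem.Dict.modify d c 0 (· + 1) else d)
      = (fun d c => if (!(c == '_')) = true then PySem.Dict.modify d c 0 (· + 1) else d) := by
    funext d c; by_cases h : c = '_' <;> simp [h]
  rw [this]

lemma spaces_shape (l : List Char) :
    l.foldl (fun (s : Int) c => if c ≠ '_' then s else s + 1) 0 = (l.count '_' : Int) := by
  have : (fun (s : Int) (c : Char) => if c ≠ '_' then s else s + 1)
      = (fun s c => if (c == '_') = true then s + 1 else s) := by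
    funext s c; by_cases h : c = '_' <;> simp [h]
  rw [this, PySem.List.foldl_count_if, List.count]
  simp

lemma space_branch (l : List Char) :
    (PySem.Dict.counter (l.filter (fun c => !(c == '_')))).items.all (fun kv => !(kv.2 == 1))
      = ((PySem.Set.ofList l).filter (fun c => !(c == '_'))).all (fun c => decide (2 ≤ l.count c)) := by
  rw [PySem.Dict.items_counter, List.all_map, Bool.eq_iff_iff]
  simp only [List.all_eq_true, Function.comp_apply]
  constructor
  · intro h c hc
    rw [List.mem_filter, PySem.Set.mem_ofList] at hc
    have hmemf : c ∈ PySem.Set.ofList (l.filter (fun c => !(c == '_'))) := by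
      rw [PySem.Set.mem_ofList, List.mem_filter]
      exact hc
    have hv := h c hmemf
    have hcount : List.count c (l.filter (fun c => !(c == '_'))) = l.count c :=
      List.count_filter hc.2
    rw [hcount] at hv
    have hpos : 0 < l.count c := List.count_pos_iff.mpr hc.1
    simp only [Bool.not_eq_eq_eq_not, Bool.not_true, beq_eq_false_iff_ne, ne_eq] at hv
    simp only [decide_eq_true_eq]
    have h1 : (l.count c : Int) ≠ 1 := hv
    omega
  · intro h k hk
    rw [PySem.Set.mem_ofList, List.mem_filter] at hk
    have hv := h k (by rw [List.mem_filter, PySem.Set.mem_ofList]; exact hk)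
    simp only [decide_eq_true_eq] at hv
    have hcount : List.count k (l.filter (fun c => !(c == '_'))) = l.count k :=
      List.count_filter hk.2
    simp only [hcount, Bool.not_eq_eq_eq_not, Bool.not_true, beq_eq_false_iff_ne, ne_eq]
    intro he
    have h1 : (l.count k : Int) = 1 := by exact_mod_cast he
    omega

lemma isIn_underscore (board : String) :
    PySem.Str.isIn "_" board = true ↔ '_' ∈ board.toList := by
  rw [PySem.Str.isIn_iff_infix]
  have h1 : "_".toList = ['_'] := rfl
  rw [h1]
  constructor
  · intro h; exact List.singleton_sublist.mp h.sublist
  · intro h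
    obtain ⟨s, t, hst⟩ := List.append_of_mem h
    exact ⟨s, t, by rw [hst]; simp⟩

-- ===== VERDICT (by name: the statement is the Claim_ definition above) =====
theorem can_make_ladybugs_happy_spec : Claim_equal_can_make_ladybugs_happy := by
  intro board _
  unfold Spec_can_make_ladybugs_happy can_make_ladybugs_happy can_make_ladybugs_happy_alt
  have hbody : (fun (acc : PySem.Dict Char Int × Int) (c : Char) =>
      if c ≠ '_' then (acc.1.modify c 0 (· + 1), acc.2) else (acc.1, acc.2 + 1))
      = (fun acc c => ((fun d c => if c ≠ '_' then PySem.Dict.modify d c 0 (· + 1) else d) acc.1 c,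
                       (fun (s : Int) c => if c ≠ '_' then s else s + 1) acc.2 c)) := by
    funext acc c; by_cases h : c = '_' <;> simp [h]
  have hst : board.toList.foldl
      (fun (acc : PySem.Dict Char Int × Int) c =>
        if c ≠ '_' then (acc.1.modify c 0 (· + 1), acc.2) else (acc.1, acc.2 + 1))
      (PySem.Dict.empty, 0)
      = (PySem.Dict.counter (board.toList.filter (fun c => !(c == '_'))),
         (board.toList.count '_' : Int)) := by
    rw [hbody, PySem.List.foldl_prod_mk
      (fun d c => if c ≠ '_' then PySem.Dict.modify d c 0 (· + 1) else d)
      (fun (s : Int) c => if c ≠ '_' then s else s + 1)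
      board.toList PySem.Dict.empty 0, counter_shape, spaces_shape]
  rw [hst]
  by_cases h : '_' ∈ board.toList
  · rw [if_neg (by
      have := List.count_pos_iff.mpr h
      simp only []
      omega : ¬ ((PySem.Dict.counter (board.toList.filter (fun c => !(c == '_'))),
        (board.toList.count '_' : Int)).2 = 0))]
    rw [if_pos ((isIn_underscore board).mpr h)]
    exact space_branch board.toList
  · rw [if_pos (by
      have := List.count_eq_zero.mpr h
      simp only []
      omega : ((PySem.Dict.counter (board.toList.filter (fun c => !(c == '_'))),
        (board.toList.count '_' : Int)).2 = 0))]
    rw [if_neg (by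
      rw [isIn_underscore board]
      exact h : ¬ PySem.Str.isIn "_" board = true)]
    rw [check_eq_all, all_happy_eq_okRun, altScan_zero]
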